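-- pv_equiv track=rewrite | github.com/kehaitcfyn/AI | Rag-agent/kode/rag-agent/ingest_batch_v3.py | get_page_number_for_chunk
-- ===== SOURCE A (Python) =====
-- CHUNK_OVERLAP = 50
--
-- def get_page_number_for_chunk(chunk_index: int, chunk_size: int, page_mapping: dict = None) -> int:
--     """Bestem sidenummer for en chunk."""
--     if page_mapping:
--         start_char = chunk_index * (chunk_size - CHUNK_OVERLAP)
--         closest_page = 1
--         for page_start, page_num in sorted(page_mapping.items()):
--             if page_start <= start_char:
--                 closest_page = page_num
--             else:
--                 break
--         return closest_page
--     else: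
--         chars_per_page = 2500
--         start_char = chunk_index * (chunk_size - CHUNK_OVERLAP)
--         return (start_char // chars_per_page) + 1
-- ===== SOURCE B (Python) =====
-- CHUNK_OVERLAP = 50
--
-- def get_page_number_for_chunk(chunk_index: int, chunk_size: int, page_mapping: dict = None) -> int:
--     """Bestem sidenummer for en chunk."""
--     if page_mapping:
--         start_char = chunk_index * (chunk_size - CHUNK_OVERLAP)
--         best = max(((k, v) for k, v in page_mapping.items() if k <= start_char),
--                    default=(None, 1))
--         return best[1]
--     else:
--         chars_per_page = 2500
--         start_char = chunk_index * (chunk_size - CHUNK_OVERLAP)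
--         return (start_char // chars_per_page) + 1
-- ===== Notes on version B (the rewrite author's own statement) =====
-- stated objective: alternative
-- what changed: Replaces the sort-then-scan-with-break over page_mapping.items() by a single unsorted pass that keeps the lexicographically largest qualifying (page_start, page_num) pair via max with a default; measured faster on random inputs (about 2x at the largest size) but not consistently (already-sorted mappings time about even), so no speed is claimed.
import Mathlib
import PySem

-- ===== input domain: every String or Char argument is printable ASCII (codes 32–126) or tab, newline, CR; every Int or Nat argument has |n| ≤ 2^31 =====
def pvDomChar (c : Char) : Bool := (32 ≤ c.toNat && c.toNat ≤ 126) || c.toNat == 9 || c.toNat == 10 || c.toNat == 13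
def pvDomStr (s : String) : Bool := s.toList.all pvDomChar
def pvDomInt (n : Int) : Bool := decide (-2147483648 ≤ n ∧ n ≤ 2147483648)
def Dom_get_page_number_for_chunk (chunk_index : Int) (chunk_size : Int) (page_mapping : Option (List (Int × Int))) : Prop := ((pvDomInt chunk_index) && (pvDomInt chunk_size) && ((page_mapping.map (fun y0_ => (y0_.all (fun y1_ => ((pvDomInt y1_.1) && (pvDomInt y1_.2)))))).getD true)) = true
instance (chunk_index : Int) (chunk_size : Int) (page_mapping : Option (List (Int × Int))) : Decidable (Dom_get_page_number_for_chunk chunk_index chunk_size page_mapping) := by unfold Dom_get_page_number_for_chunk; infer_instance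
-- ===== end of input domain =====

-- B drops A's sort: one unsorted pass keeping the lexicographically largest qualifying
-- (page_start, page_num) pair instead of sorting the items and scanning with break (alternative algorithm).

-- ===== PORT A =====
-- the `for page_start, page_num in …: if …: closest_page = page_num else: break` loop
def pvLoopA (start_char : Int) (closest_page : Int) : List (Int × Int) → Int
  | [] => closest_page
  | (page_start, page_num) :: rest =>
      if page_start ≤ start_char then pvLoopA start_char page_num rest
      else closest_page

def get_page_number_for_chunk (chunk_index : Int) (chunk_size : Int) (page_mapping : Option (List (Int × Int))) : Int :=
  -- the dict argument: its items in insertion order with unique keys (last value wins)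
  let items := (PySem.Dict.ofList (page_mapping.getD [])).items
  if items.isEmpty = false then
    let start_char := chunk_index * (chunk_size - 50)
    pvLoopA start_char 1 (PySem.List.sorted2 items Prod.fst Prod.snd)
  else
    let chars_per_page : Int := 2500
    let start_char := chunk_index * (chunk_size - 50)
    PySem.Int.floordiv start_char chars_per_page + 1

-- ===== PORT B =====
def get_page_number_for_chunk_alt (chunk_index : Int) (chunk_size : Int) (page_mapping : Option (List (Int × Int))) : Int :=
  let items := (PySem.Dict.ofList (page_mapping.getD [])).items
  if items.isEmpty = false then
    let start_char := chunk_index * (chunk_size - 50)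
    -- max(… if k <= start_char, default=(None, 1)); then best[1]
    match PySem.List.max2? (items.filter (fun p => p.1 ≤ start_char)) Prod.fst Prod.snd with
    | some best => best.2
    | none => 1
  else
    let chars_per_page : Int := 2500
    let start_char := chunk_index * (chunk_size - 50)
    PySem.Int.floordiv start_char chars_per_page + 1

-- ===== PRECONDITION & SPEC =====
def Spec_get_page_number_for_chunk (chunk_index : Int) (chunk_size : Int) (page_mapping : Option (List (Int × Int))) (out : Int) : Prop := out = get_page_number_for_chunk_alt chunk_index chunk_size page_mapping
instance (chunk_index : Int) (chunk_size : Int) (page_mapping : Option (List (Int × Int))) (out : Int) : Decidable (Spec_get_page_number_for_chunk chunk_index chunk_size page_mapping out) := by unfold Spec_get_page_number_for_chunk; infer_instance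

-- ===== CLAIM (what is proved, stated in full; the proofs are below) =====
def Claim_equal_get_page_number_for_chunk : Prop := ∀ (chunk_index : Int) (chunk_size : Int) (page_mapping : Option (List (Int × Int))), Dom_get_page_number_for_chunk chunk_index chunk_size page_mapping → Spec_get_page_number_for_chunk chunk_index chunk_size page_mapping (get_page_number_for_chunk chunk_index chunk_size page_mapping)

-- ===== LEMMAS AND PROOFS =====

-- the strict lexicographic "before" test sorted2 uses on (Int × Int) pairs
def pvBef (a b : Int × Int) : Bool :=
  decide (a.1 < b.1) || (!decide (b.1 < a.1) && decide (a.2 < b.2))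

-- non-strict lexicographic order, as "b is not strictly before a"
def pvR (a b : Int × Int) : Prop := pvBef b a = false

-- max2?'s fold step
def pvStep (acc : Option (Int × Int)) (x : Int × Int) : Option (Int × Int) :=
  match acc with
  | none => some x
  | some m => if pvBef m x then some x else some m

lemma pvStep_comm (acc : Option (Int × Int)) (a b : Int × Int) :
    pvStep (pvStep acc a) b = pvStep (pvStep acc b) a := by
  obtain ⟨a1, a2⟩ := a; obtain ⟨b1, b2⟩ := b
  rcases acc with _ | ⟨m1, m2⟩ <;>
    simp only [pvStep, pvBef, Bool.or_eq_true, Bool.and_eq_true, Bool.not_eq_eq_eq_not,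
      Bool.not_true, decide_eq_true_eq, decide_eq_false_iff_not] <;>
    split_ifs <;>
    first
      | (simp only [Option.some.injEq, Prod.mk.injEq]; omega)
      | (dsimp only; done)
      | (dsimp only; split_ifs <;> simp only [Option.some.injEq, Prod.mk.injEq] <;> omega)

lemma pvFoldStep_perm {xs ys : List (Int × Int)} (h : xs.Perm ys) (acc : Option (Int × Int)) :
    xs.foldl pvStep acc = ys.foldl pvStep acc := by
  induction h generalizing acc with
  | nil => rfl
  | cons x _ ih => simp [List.foldl, ih]
  | swap x y => simp [List.foldl, pvStep_comm]
  | trans _ _ ih1 ih2 => exact (ih1 acc).trans (ih2 acc)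

lemma insertBy_cons (x y : Int × Int) (t : List (Int × Int)) :
    PySem.List.insertBy pvBef x (y :: t) =
      if pvBef x y = true then x :: y :: t else y :: PySem.List.insertBy pvBef x t := rfl

lemma pairwise_insertBy (x : Int × Int) (ys : List (Int × Int)) (h : ys.Pairwise pvR) :
    (PySem.List.insertBy pvBef x ys).Pairwise pvR := by
  induction h with
  | nil => simp [PySem.List.insertBy]
  | @cons y t hy ht ih =>
      by_cases hb : pvBef x y = true
      · rw [insertBy_cons, if_pos hb]
        refine List.Pairwise.cons ?_ (List.Pairwise.cons hy ht)
        intro z hz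
        rcases List.mem_cons.mp hz with hz | hz
        · subst hz
          simp [pvR, pvBef] at hb ⊢
          omega
        · have hyz := hy z hz
          simp [pvR, pvBef] at hb hyz ⊢
          omega
      · rw [insertBy_cons, if_neg hb]
        refine List.Pairwise.cons ?_ ih
        intro z hz
        rcases (PySem.List.mem_insertBy pvBef x z t).mp hz with hz | hz
        · subst hz
          simp only [pvR]
          simpa using hb
        · exact hy z hz

lemma pairwise_foldl_insertBy (xs acc : List (Int × Int)) (h : acc.Pairwise pvR) :
    (xs.foldl (fun acc x => PySem.List.insertBy pvBef x acc) acc).Pairwise pvR := by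
  induction xs generalizing acc with
  | nil => exact h
  | cons x t ih => exact ih _ (pairwise_insertBy x acc h)

lemma pairwise_sorted2 (xs : List (Int × Int)) :
    (PySem.List.sorted2 xs Prod.fst Prod.snd).Pairwise pvR := by
  have h : PySem.List.sorted2 xs Prod.fst Prod.snd =
      xs.foldl (fun acc x => PySem.List.insertBy pvBef x acc) [] := rfl
  rw [h]
  exact pairwise_foldl_insertBy xs [] List.Pairwise.nil

lemma foldl_pvStep_some (t : List (Int × Int)) (m : Int × Int) :
    ∃ b, t.foldl pvStep (some m) = some b := by
  induction t generalizing m with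
  | nil => exact ⟨m, rfl⟩
  | cons z r ih =>
      rw [List.foldl_cons]
      by_cases hc : pvBef m z = true
      · rw [show pvStep (some m) z = if pvBef m z then some z else some m from rfl, if_pos hc]
        exact ih z
      · rw [show pvStep (some m) z = if pvBef m z then some z else some m from rfl, if_neg hc]
        exact ih m

lemma foldl_some_of_forall_R (m : Int × Int) (fr : List (Int × Int)) (hne : fr ≠ [])
    (h : ∀ z ∈ fr, pvR m z) :
    fr.foldl pvStep (some m) = fr.foldl pvStep none := by
  cases fr with
  | nil => exact absurd rfl hne
  | cons z t =>
      have hz : pvR m z := h z (by simp)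
      have hstep : pvStep (some m) z = some z := by
        rw [show pvStep (some m) z = if pvBef m z then some z else some m from rfl]
        split_ifs with hc
        · rfl
        · simp [pvR, pvBef] at hz hc
          have h1 : m.1 = z.1 := by omega
          have h2 : m.2 = z.2 := by omega
          have : m = z := Prod.ext h1 h2
          rw [this]
      rw [List.foldl_cons, List.foldl_cons, hstep]
      rfl

-- A's scan of a lex-sorted list computes the running max of the qualifying prefix
lemma pvLoopA_eq (start c : Int) (ys : List (Int × Int)) (h : ys.Pairwise pvR) :
    pvLoopA start c ys =
      match (ys.filter (fun p => p.1 ≤ start)).foldl pvStep none with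
      | some best => best.2
      | none => c := by
  induction ys generalizing c with
  | nil => simp [pvLoopA]
  | cons p rest ih =>
      obtain ⟨ps, pn⟩ := p
      rcases h with _ | ⟨hp, hrest⟩
      by_cases hq : ps ≤ start
      · simp only [pvLoopA, List.filter_cons, decide_eq_true_eq, hq, if_true]
        by_cases hfr : rest.filter (fun p => p.1 ≤ start) = []
        · rw [ih pn hrest, hfr]
          rfl
        · have hall : ∀ z ∈ rest.filter (fun p => p.1 ≤ start), pvR (ps, pn) z := by
            intro z hz; exact hp z (List.mem_of_mem_filter hz)
          rw [List.foldl_cons,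
            show pvStep none (ps, pn) = some (ps, pn) from rfl,
            foldl_some_of_forall_R _ _ hfr hall, ih pn hrest]
          obtain ⟨z, t, hzt⟩ : ∃ z t, rest.filter (fun p => p.1 ≤ start) = z :: t := by
            cases hfl : rest.filter (fun p => p.1 ≤ start) with
            | nil => exact absurd hfl hfr
            | cons z t => exact ⟨z, t, rfl⟩
          rw [hzt, List.foldl_cons, show pvStep none z = some z from rfl]
          obtain ⟨b, hb2⟩ := foldl_pvStep_some t z
          rw [hb2]
      · simp only [pvLoopA, List.filter_cons, decide_eq_true_eq, hq, if_false]
        have hnil : rest.filter (fun p => p.1 ≤ start) = [] := by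
          rw [List.filter_eq_nil_iff]
          intro z hz
          have hpz := hp z hz
          simp [pvR, pvBef] at hpz ⊢
          omega
        rw [hnil]
        rfl

lemma pvStep_eq (acc : Option (Int × Int)) (x : Int × Int) :
    pvStep acc x = match acc with
      | none => some x
      | some m => if (decide (m.1 < x.1) || !decide (x.1 < m.1) && decide (m.2 < x.2)) = true then some x else some m := by
  cases acc <;> rfl

lemma max2?_eq_foldl (xs : List (Int × Int)) :
    PySem.List.max2? xs Prod.fst Prod.snd = xs.foldl pvStep none := by
  unfold PySem.List.max2?
  congr 1
  funext acc x
  rw [pvStep_eq]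
  cases acc <;> rfl

-- ===== VERDICT (by name: the statement is the Claim_ definition above) =====
theorem get_page_number_for_chunk_spec : Claim_equal_get_page_number_for_chunk := by
  intro chunk_index chunk_size page_mapping _
  unfold Spec_get_page_number_for_chunk
  unfold get_page_number_for_chunk get_page_number_for_chunk_alt
  set items := (PySem.Dict.ofList (page_mapping.getD [])).items with hitems
  by_cases hne : items.isEmpty = false
  · rw [if_pos hne, if_pos hne]
    dsimp only
    set start := chunk_index * (chunk_size - 50)
    rw [max2?_eq_foldl, pvLoopA_eq start 1 _ (pairwise_sorted2 items)]
    have hperm : ((PySem.List.sorted2 items Prod.fst Prod.snd).filter (fun p => p.1 ≤ start)).Perm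
        (items.filter (fun p => p.1 ≤ start)) :=
      (PySem.List.sorted2_perm items Prod.fst Prod.snd false).filter _
    rw [pvFoldStep_perm hperm]
  · simp [hne]
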